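-- pv_equiv track=rewrite | github.com/dhwani2/ITI1120Assignments | a3_300195321/a3_part2_300195321.py | casual_number
-- ===== SOURCE A (Python) =====
-- def casual_number(s):
--     """
--     Returns number regardless of comma placement, letters.
--     Precondition: commas are in meaningful places.
--     @type s: string
--     @rtype: string
--     """
--     str1 = ""
--     empt1 = ""
--     change = 0
--
--     for i in range (0, len(s)):
--
--         if (s[i] == ',') :
--             str1 = str1
--
--         elif (s[i].isdigit()):
--             str1 = str1 + s[i]
--             change = 1
--
--         elif (s[i] == '-') :
--             str1 = str1 + s[i]
--
--         else:
--             return empt1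
--
--     if (change == 1):
--         return str1
--
--     else:
--         return empt1
-- ===== SOURCE B (Python) =====
-- def casual_number(s):
--     if any(c != ',' and c != '-' and not c.isdigit() for c in s):
--         return ""
--     t = s.replace(',', '')
--     return t if any(c.isdigit() for c in t) else ""
-- ===== Notes on version B (the rewrite author's own statement) =====
-- stated objective: idiomatic
-- what changed: Replaced the single interleaved loop with early return and a digit flag by three separate whole-string passes: validate every character, drop commas with str.replace, then keep the result only if it contains a digit.
import Mathlib
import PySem

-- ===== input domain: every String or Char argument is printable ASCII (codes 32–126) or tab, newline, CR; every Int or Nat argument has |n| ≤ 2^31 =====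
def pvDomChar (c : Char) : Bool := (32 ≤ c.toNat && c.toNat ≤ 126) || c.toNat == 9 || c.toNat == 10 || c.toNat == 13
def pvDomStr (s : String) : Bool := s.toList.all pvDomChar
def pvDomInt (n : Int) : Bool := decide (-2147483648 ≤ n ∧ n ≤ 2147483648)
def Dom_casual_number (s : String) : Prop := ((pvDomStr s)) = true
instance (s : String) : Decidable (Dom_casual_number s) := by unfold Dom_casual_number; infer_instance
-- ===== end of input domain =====

-- B replaces A's single interleaved loop (early return + digit flag) by three whole-string
-- passes: validate, drop commas, keep only if a digit is present (idiomatic; same values).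

-- ===== PORT A =====
-- A's loop over s, carrying str1 (as its character list) and the digit flag `change`;
-- returning "" models A's early `return empt1` on an invalid character.
def pvLoopA : List Char → List Char → Bool → String
  | [], str1, change => if change then String.mk str1 else ""
  | c :: cs, str1, change =>
    if c = ',' then pvLoopA cs str1 change
    else if c.isDigit then pvLoopA cs (str1 ++ [c]) true
    else if c = '-' then pvLoopA cs (str1 ++ [c]) change
    else ""

def casual_number (s : String) : String := pvLoopA s.toList [] false

-- ===== PORT B =====
def casual_number_alt (s : String) : String :=
  if s.toList.any (fun c => ¬(c = ',') ∧ ¬(c = '-') ∧ ¬(c.isDigit = true)) then ""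
  else
    let t := s.toList.filter (fun c => c ≠ ',')
    if t.any Char.isDigit then String.mk t else ""

-- ===== PRECONDITION & SPEC =====
def Spec_casual_number (s : String) (out : String) : Prop := out = casual_number_alt s
instance (s : String) (out : String) : Decidable (Spec_casual_number s out) := by unfold Spec_casual_number; infer_instance

-- ===== CLAIM (what is proved, stated in full; the proofs are below) =====
def Claim_equal_casual_number : Prop := ∀ (s : String), Dom_casual_number s → Spec_casual_number s (casual_number s)

-- ===== LEMMAS AND PROOFS =====
lemma pvLoopA_eq (cs : List Char) : ∀ (acc : List Char) (change : Bool),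
    pvLoopA cs acc change =
      if cs.any (fun c => !(c = ',' : Bool) && !(c = '-' : Bool) && !c.isDigit) then ""
      else
        let t := cs.filter (fun c => c ≠ ',')
        if change || t.any Char.isDigit then String.mk (acc ++ t) else "" := by
  induction cs with
  | nil => intro acc change; simp [pvLoopA]
  | cons c cs ih =>
    intro acc change
    by_cases hc : c = ','
    · subst hc
      simp [pvLoopA, ih]
    · by_cases hd : c.isDigit
      · simp [pvLoopA, hc, hd, ih]
      · by_cases hm : c = '-'
        · subst hm
          simp [pvLoopA, hd, ih]
        · simp [pvLoopA, hc, hd, hm]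

-- ===== VERDICT (by name: the statement is the Claim_ definition above) =====
theorem casual_number_spec : Claim_equal_casual_number := by
  intro s _
  unfold Spec_casual_number casual_number casual_number_alt
  rw [pvLoopA_eq]
  simp [and_assoc]
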